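-- pv_equiv track=rewrite | github.com/wddddds1/TcadGPT | elmer/IR_DPO_ELMER/1.IR_batch.py | _match_section_header
-- ===== SOURCE A (Python) =====
-- from typing import Any, Dict, List, Optional, Tuple
--
-- SECTION_NAMES = [
--     "Boundary Condition",
--     "Initial Condition",
--     "Body Force",
--     "Body",
--     "Material",
--     "Equation",
--     "Solver",
--     "Simulation",
--     "Header",
--     "Constants",
--     "Component",
-- ]
--
-- def _match_section_header(s: str) -> Optional[Tuple[str, Optional[str]]]:
--     low = s.lower()
--     for name in sorted(SECTION_NAMES, key=len, reverse=True):
--         nlow = name.lower()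
--         if low == nlow or low.startswith(nlow + " "):
--             rest = s[len(name):].strip()
--             return name, rest if rest else None
--     return None
-- ===== SOURCE B (Python) =====
-- from typing import Any, Dict, List, Optional, Tuple
--
-- SECTION_NAMES = [
--     "Boundary Condition",
--     "Initial Condition",
--     "Body Force",
--     "Body",
--     "Material",
--     "Equation",
--     "Solver",
--     "Simulation",
--     "Header",
--     "Constants",
--     "Component",
-- ]
--
-- def _match_section_header(s: str) -> Optional[Tuple[str, Optional[str]]]:
--     low = s.lower()
--     best = None
--     for name in SECTION_NAMES:
--         nlow = name.lower()
--         if (low == nlow or low.startswith(nlow + " ")) and (best is None or len(best) < len(name)):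
--             best = name
--     if best is None:
--         return None
--     rest = s[len(best):].strip()
--     return best, rest if rest else None
-- ===== Notes on version B (the rewrite author's own statement) =====
-- stated objective: alternative
-- what changed: Replaced sorting SECTION_NAMES by length on every call and returning the first match with a single unsorted scan that keeps the strictly longest matching name (strict > preserves the stable sort's first-wins tie behaviour), computing the remainder once after the loop.
import Mathlib
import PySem

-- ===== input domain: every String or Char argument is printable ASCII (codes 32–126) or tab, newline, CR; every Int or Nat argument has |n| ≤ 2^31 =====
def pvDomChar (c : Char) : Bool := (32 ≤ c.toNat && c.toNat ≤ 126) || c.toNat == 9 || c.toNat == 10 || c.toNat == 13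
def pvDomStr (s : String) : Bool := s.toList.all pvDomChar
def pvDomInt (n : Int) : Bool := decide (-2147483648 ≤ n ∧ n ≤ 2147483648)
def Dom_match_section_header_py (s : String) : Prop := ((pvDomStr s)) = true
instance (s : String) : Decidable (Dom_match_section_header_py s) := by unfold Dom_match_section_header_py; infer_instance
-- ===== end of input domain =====

-- B replaces A's sort-then-first-match by a single unsorted scan keeping the strictly longest matching name (objective: alternative decomposition).

-- module constant SECTION_NAMES (shared context of both Pythons)
def sectionNames : List String :=
  ["Boundary Condition", "Initial Condition", "Body Force", "Body", "Material",
   "Equation", "Solver", "Simulation", "Header", "Constants", "Component"]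

-- the test 'low == nlow or low.startswith(nlow + " ")' (textually identical in A and B)
def mtch (low name : String) : Bool :=
  low == PySem.Str.lower name || PySem.Str.startswith low (PySem.Str.lower name ++ " ")

-- 'rest = s[len(name):].strip(); (name, rest if rest else None)' (textually identical in A and B)
def mkRes (s name : String) : String × Option String :=
  let rest := PySem.Str.strip (PySem.Str.slice s (some (PySem.Str.len name)) none)
  (name, if rest == "" then none else some rest)

-- ===== PORT A =====
-- the 'for name in sorted(SECTION_NAMES, key=len, reverse=True)' loop: return at the first match
def goA (s low : String) : List String → Option (String × Option String)
  | [] => none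
  | name :: names => if mtch low name then some (mkRes s name) else goA s low names

def match_section_header_py (s : String) : Option (String × Option String) :=
  goA s (PySem.Str.lower s)
    (PySem.List.sorted sectionNames (fun n => PySem.Str.len n) true)

-- ===== PORT B =====
-- single scan over SECTION_NAMES in original order, keeping the strictly longest matching name
def bestSection (low : String) : List String → Option String → Option String
  | [], best => best
  | name :: names, best =>
      bestSection low names
        (if mtch low name &&
            (match best with
             | none => true
             | some b => decide (PySem.Str.len b < PySem.Str.len name)) then some name else best)

def match_section_header_py_alt (s : String) : Option (String × Option String) :=
  match bestSection (PySem.Str.lower s) sectionNames none with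
  | none => none
  | some best => some (mkRes s best)

-- ===== PRECONDITION & SPEC =====
def Spec_match_section_header_py (s : String) (out : Option (String × Option String)) : Prop := out = match_section_header_py_alt s
instance (s : String) (out : Option (String × Option String)) : Decidable (Spec_match_section_header_py s out) := by unfold Spec_match_section_header_py; infer_instance

-- ===== CLAIM (what is proved, stated in full; the proofs are below) =====
def Claim_equal_match_section_header_py : Prop := ∀ (s : String), Dom_match_section_header_py s → Spec_match_section_header_py s (match_section_header_py s)

-- ===== LEMMAS AND PROOFS =====

-- Python's stable sorted(SECTION_NAMES, key=len, reverse=True), as a literal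
theorem sortedNames :
    PySem.List.sorted sectionNames (fun n => PySem.Str.len n) true =
    ["Boundary Condition", "Initial Condition", "Body Force", "Simulation",
     "Constants", "Component", "Material", "Equation", "Solver", "Header", "Body"] := by
  decide

-- invariant carried through B's scan: the current best (if any) is shorter than k
def bLT (k : Int) : Option String → Prop
  | none => True
  | some b => PySem.Str.len b < k

theorem bestSection_append (low : String) (l1 l2 : List String) (b : Option String) :
    bestSection low (l1 ++ l2) b = bestSection low l2 (bestSection low l1 b) := by
  induction l1 generalizing b with
  | nil => rfl
  | cons n t ih => simp only [List.cons_append, bestSection, ih]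

theorem bestSection_lt (low : String) (k : Int) (l : List String) (b : Option String)
    (hl : ∀ n ∈ l, PySem.Str.len n < k ∨ mtch low n = false) (hb : bLT k b) :
    bLT k (bestSection low l b) := by
  induction l generalizing b with
  | nil => exact hb
  | cons n t ih =>
    simp only [bestSection]
    refine ih _ (fun m hm => hl m (List.mem_cons_of_mem _ hm)) ?_
    rcases hl n (List.mem_cons_self ..) with h' | h'
    · split_ifs with h
      · exact h'
      · exact hb
    · simp only [h', Bool.false_and, if_neg Bool.false_ne_true]
      exact hb

theorem bestSection_stable (low : String) (l : List String) (b : String)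
    (hl : ∀ n ∈ l, PySem.Str.len n ≤ PySem.Str.len b ∨ mtch low n = false) :
    bestSection low l (some b) = some b := by
  induction l with
  | nil => rfl
  | cons n t ih =>
    simp only [bestSection]
    have hcond : (mtch low n && decide (PySem.Str.len b < PySem.Str.len n)) = false := by
      rcases hl n (List.mem_cons_self ..) with h' | h'
      · have : decide (PySem.Str.len b < PySem.Str.len n) = false := by
          simp only [decide_eq_false_iff_not]
          omega
        rw [this, Bool.and_false]
      · simp [h']
    rw [hcond, if_neg Bool.false_ne_true]
    exact ih (fun m hm => hl m (List.mem_cons_of_mem _ hm))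

theorem bestSection_none (low : String) (l : List String)
    (hl : ∀ n ∈ l, mtch low n = false) : bestSection low l none = none := by
  induction l with
  | nil => rfl
  | cons n t ih =>
    simp only [bestSection, hl n (List.mem_cons_self ..), Bool.false_and,
      if_neg Bool.false_ne_true]
    exact ih (fun m hm => hl m (List.mem_cons_of_mem _ hm))

-- B's scan returns x when everything before x in the list is shorter (or no match)
-- and everything after is no longer (or no match)
theorem bestSection_wins (low : String) (l1 l2 : List String) (x : String)
    (hpre : ∀ n ∈ l1, PySem.Str.len n < PySem.Str.len x ∨ mtch low n = false)
    (hx : mtch low x = true)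
    (hpost : ∀ n ∈ l2, PySem.Str.len n ≤ PySem.Str.len x ∨ mtch low n = false) :
    bestSection low (l1 ++ x :: l2) none = some x := by
  have h0 := bestSection_lt low (PySem.Str.len x) l1 none hpre trivial
  rw [bestSection_append]
  rcases hb : bestSection low l1 none with _ | b
  · simp only [bestSection, hx, Bool.true_and]
    exact bestSection_stable low l2 x hpost
  · rw [hb] at h0
    have : decide (PySem.Str.len b < PySem.Str.len x) = true := by
      simpa [bLT] using h0
    simp only [bestSection, hx, this, Bool.true_and]
    exact bestSection_stable low l2 x hpost

set_option maxHeartbeats 1000000 in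
theorem main_eq (s : String) : match_section_header_py s = match_section_header_py_alt s := by
  unfold match_section_header_py match_section_header_py_alt
  rw [sortedNames]
  generalize PySem.Str.lower s = low
  cases h1 : mtch low "Boundary Condition" with
  | true =>
    have hb : bestSection low sectionNames none = some "Boundary Condition" := by
      have e : sectionNames = [] ++ "Boundary Condition" :: ["Initial Condition", "Body Force", "Body", "Material", "Equation", "Solver", "Simulation", "Header", "Constants", "Component"] := rfl
      rw [e]
      exact bestSection_wins low _ _ _ (by intro n hn; fin_cases hn) h1 (by intro n hn; fin_cases hn <;> [exact Or.inl (by decide); exact Or.inl (by decide); exact Or.inl (by decide); exact Or.inl (by decide); exact Or.inl (by decide); exact Or.inl (by decide); exact Or.inl (by decide); exact Or.inl (by decide); exact Or.inl (by decide); exact Or.inl (by decide)])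
    rw [hb]; simp [goA, h1]
  | false =>
  cases h2 : mtch low "Initial Condition" with
  | true =>
    have hb : bestSection low sectionNames none = some "Initial Condition" := by
      have e : sectionNames = ["Boundary Condition"] ++ "Initial Condition" :: ["Body Force", "Body", "Material", "Equation", "Solver", "Simulation", "Header", "Constants", "Component"] := rfl
      rw [e]
      exact bestSection_wins low _ _ _ (by intro n hn; fin_cases hn; exact Or.inr h1) h2 (by intro n hn; fin_cases hn <;> [exact Or.inl (by decide); exact Or.inl (by decide); exact Or.inl (by decide); exact Or.inl (by decide); exact Or.inl (by decide); exact Or.inl (by decide); exact Or.inl (by decide); exact Or.inl (by decide); exact Or.inl (by decide)])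
    rw [hb]; simp [goA, h1, h2]
  | false =>
  cases h3 : mtch low "Body Force" with
  | true =>
    have hb : bestSection low sectionNames none = some "Body Force" := by
      have e : sectionNames = ["Boundary Condition", "Initial Condition"] ++ "Body Force" :: ["Body", "Material", "Equation", "Solver", "Simulation", "Header", "Constants", "Component"] := rfl
      rw [e]
      exact bestSection_wins low _ _ _ (by intro n hn; fin_cases hn <;> [exact Or.inr h1; exact Or.inr h2]) h3 (by intro n hn; fin_cases hn <;> [exact Or.inl (by decide); exact Or.inl (by decide); exact Or.inl (by decide); exact Or.inl (by decide); exact Or.inl (by decide); exact Or.inl (by decide); exact Or.inl (by decide); exact Or.inl (by decide)])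
    rw [hb]; simp [goA, h1, h2, h3]
  | false =>
  cases h4 : mtch low "Simulation" with
  | true =>
    have hb : bestSection low sectionNames none = some "Simulation" := by
      have e : sectionNames = ["Boundary Condition", "Initial Condition", "Body Force", "Body", "Material", "Equation", "Solver"] ++ "Simulation" :: ["Header", "Constants", "Component"] := rfl
      rw [e]
      exact bestSection_wins low _ _ _ (by intro n hn; fin_cases hn <;> [exact Or.inr h1; exact Or.inr h2; exact Or.inr h3; exact Or.inl (by decide); exact Or.inl (by decide); exact Or.inl (by decide); exact Or.inl (by decide)]) h4 (by intro n hn; fin_cases hn <;> [exact Or.inl (by decide); exact Or.inl (by decide); exact Or.inl (by decide)])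
    rw [hb]; simp [goA, h1, h2, h3, h4]
  | false =>
  cases h5 : mtch low "Constants" with
  | true =>
    have hb : bestSection low sectionNames none = some "Constants" := by
      have e : sectionNames = ["Boundary Condition", "Initial Condition", "Body Force", "Body", "Material", "Equation", "Solver", "Simulation", "Header"] ++ "Constants" :: ["Component"] := rfl
      rw [e]
      exact bestSection_wins low _ _ _ (by intro n hn; fin_cases hn <;> [exact Or.inr h1; exact Or.inr h2; exact Or.inr h3; exact Or.inl (by decide); exact Or.inl (by decide); exact Or.inl (by decide); exact Or.inl (by decide); exact Or.inr h4; exact Or.inl (by decide)]) h5 (by intro n hn; fin_cases hn; exact Or.inl (by decide))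
    rw [hb]; simp [goA, h1, h2, h3, h4, h5]
  | false =>
  cases h6 : mtch low "Component" with
  | true =>
    have hb : bestSection low sectionNames none = some "Component" := by
      have e : sectionNames = ["Boundary Condition", "Initial Condition", "Body Force", "Body", "Material", "Equation", "Solver", "Simulation", "Header", "Constants"] ++ "Component" :: [] := rfl
      rw [e]
      exact bestSection_wins low _ _ _ (by intro n hn; fin_cases hn <;> [exact Or.inr h1; exact Or.inr h2; exact Or.inr h3; exact Or.inl (by decide); exact Or.inl (by decide); exact Or.inl (by decide); exact Or.inl (by decide); exact Or.inr h4; exact Or.inl (by decide); exact Or.inr h5]) h6 (by intro n hn; fin_cases hn)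
    rw [hb]; simp [goA, h1, h2, h3, h4, h5, h6]
  | false =>
  cases h7 : mtch low "Material" with
  | true =>
    have hb : bestSection low sectionNames none = some "Material" := by
      have e : sectionNames = ["Boundary Condition", "Initial Condition", "Body Force", "Body"] ++ "Material" :: ["Equation", "Solver", "Simulation", "Header", "Constants", "Component"] := rfl
      rw [e]
      exact bestSection_wins low _ _ _ (by intro n hn; fin_cases hn <;> [exact Or.inr h1; exact Or.inr h2; exact Or.inr h3; exact Or.inl (by decide)]) h7 (by intro n hn; fin_cases hn <;> [exact Or.inl (by decide); exact Or.inl (by decide); exact Or.inr h4; exact Or.inl (by decide); exact Or.inr h5; exact Or.inr h6])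
    rw [hb]; simp [goA, h1, h2, h3, h4, h5, h6, h7]
  | false =>
  cases h8 : mtch low "Equation" with
  | true =>
    have hb : bestSection low sectionNames none = some "Equation" := by
      have e : sectionNames = ["Boundary Condition", "Initial Condition", "Body Force", "Body", "Material"] ++ "Equation" :: ["Solver", "Simulation", "Header", "Constants", "Component"] := rfl
      rw [e]
      exact bestSection_wins low _ _ _ (by intro n hn; fin_cases hn <;> [exact Or.inr h1; exact Or.inr h2; exact Or.inr h3; exact Or.inl (by decide); exact Or.inr h7]) h8 (by intro n hn; fin_cases hn <;> [exact Or.inl (by decide); exact Or.inr h4; exact Or.inl (by decide); exact Or.inr h5; exact Or.inr h6])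
    rw [hb]; simp [goA, h1, h2, h3, h4, h5, h6, h7, h8]
  | false =>
  cases h9 : mtch low "Solver" with
  | true =>
    have hb : bestSection low sectionNames none = some "Solver" := by
      have e : sectionNames = ["Boundary Condition", "Initial Condition", "Body Force", "Body", "Material", "Equation"] ++ "Solver" :: ["Simulation", "Header", "Constants", "Component"] := rfl
      rw [e]
      exact bestSection_wins low _ _ _ (by intro n hn; fin_cases hn <;> [exact Or.inr h1; exact Or.inr h2; exact Or.inr h3; exact Or.inl (by decide); exact Or.inr h7; exact Or.inr h8]) h9 (by intro n hn; fin_cases hn <;> [exact Or.inr h4; exact Or.inl (by decide); exact Or.inr h5; exact Or.inr h6])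
    rw [hb]; simp [goA, h1, h2, h3, h4, h5, h6, h7, h8, h9]
  | false =>
  cases h10 : mtch low "Header" with
  | true =>
    have hb : bestSection low sectionNames none = some "Header" := by
      have e : sectionNames = ["Boundary Condition", "Initial Condition", "Body Force", "Body", "Material", "Equation", "Solver", "Simulation"] ++ "Header" :: ["Constants", "Component"] := rfl
      rw [e]
      exact bestSection_wins low _ _ _ (by intro n hn; fin_cases hn <;> [exact Or.inr h1; exact Or.inr h2; exact Or.inr h3; exact Or.inl (by decide); exact Or.inr h7; exact Or.inr h8; exact Or.inr h9; exact Or.inr h4]) h10 (by intro n hn; fin_cases hn <;> [exact Or.inr h5; exact Or.inr h6])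
    rw [hb]; simp [goA, h1, h2, h3, h4, h5, h6, h7, h8, h9, h10]
  | false =>
  cases h11 : mtch low "Body" with
  | true =>
    have hb : bestSection low sectionNames none = some "Body" := by
      have e : sectionNames = ["Boundary Condition", "Initial Condition", "Body Force"] ++ "Body" :: ["Material", "Equation", "Solver", "Simulation", "Header", "Constants", "Component"] := rfl
      rw [e]
      exact bestSection_wins low _ _ _ (by intro n hn; fin_cases hn <;> [exact Or.inr h1; exact Or.inr h2; exact Or.inr h3]) h11 (by intro n hn; fin_cases hn <;> [exact Or.inr h7; exact Or.inr h8; exact Or.inr h9; exact Or.inr h4; exact Or.inr h10; exact Or.inr h5; exact Or.inr h6])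
    rw [hb]; simp [goA, h1, h2, h3, h4, h5, h6, h7, h8, h9, h10, h11]
  | false =>
  have hb : bestSection low sectionNames none = none :=
    bestSection_none low _ (by intro n hn; fin_cases hn <;> [exact h1; exact h2; exact h3; exact h11; exact h7; exact h8; exact h9; exact h4; exact h10; exact h5; exact h6])
  rw [hb]; simp [goA, h1, h2, h3, h4, h5, h6, h7, h8, h9, h10, h11]

-- ===== VERDICT (by name: the statement is the Claim_ definition above) =====
theorem match_section_header_py_spec : Claim_equal_match_section_header_py := by
  intro s _
  unfold Spec_match_section_header_py
  exact main_eq s
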